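-- pv_equiv track=rewrite | github.com/kuweg/yapoc | app/backend/routers/memory_graph.py | _cluster_label
-- ===== SOURCE A (Python) =====
-- from collections import Counter
--
-- _STOPWORDS = {
--     "the", "a", "an", "and", "or", "to", "in", "of", "is", "was", "i",
--     "it", "for", "on", "at", "with", "this", "that", "from", "by", "are",
--     "be", "as", "had", "have", "has", "not", "but", "they", "their",
--     "my", "we", "you", "your", "its", "into", "which", "will", "can",
--     "been", "were", "would", "could", "should", "he", "she", "also",
--     "all", "more", "when", "there", "if", "than", "so", "out", "about",
--     "up", "some", "then", "no", "do", "did", "just", "now", "new",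
-- }
--
-- def _cluster_label(contents: list[str]) -> str:
--     """Top 3 frequent non-stopword words joined by ' / '."""
--     words = [
--         w.lower().strip(".,;:!?\"'()[]")
--         for c in contents
--         for w in c.split()
--         if len(w) > 3
--         and w.lower().strip(".,;:!?\"'()[]") not in _STOPWORDS
--     ]
--     top = Counter(words).most_common(3)
--     return " / ".join(w for w, _ in top) or "cluster"
-- ===== SOURCE B (Python) =====
-- _STOPWORDS = {
--     "the", "a", "an", "and", "or", "to", "in", "of", "is", "was", "i",
--     "it", "for", "on", "at", "with", "this", "that", "from", "by", "are",
--     "be", "as", "had", "have", "has", "not", "but", "they", "their",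
--     "my", "we", "you", "your", "its", "into", "which", "will", "can",
--     "been", "were", "would", "could", "should", "he", "she", "also",
--     "all", "more", "when", "there", "if", "than", "so", "out", "about",
--     "up", "some", "then", "no", "do", "did", "just", "now", "new",
-- }
--
-- def _cluster_label(contents: list[str]) -> str:
--     """Top 3 frequent non-stopword words joined by ' / '."""
--     counts = {}
--     for c in contents:
--         for raw in c.split():
--             if len(raw) > 3:
--                 w = raw.lower().strip(".,;:!?\"'()[]")
--                 if w not in _STOPWORDS:
--                     counts[w] = counts.get(w, 0) + 1
--     items = list(counts.items())
--     top = []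
--     while len(top) < 3 and items:
--         best_w, best_c = items[0]
--         for w2, c2 in items[1:]:
--             if c2 > best_c:
--                 best_w, best_c = w2, c2
--         top.append(best_w)
--         items = [(w2, c2) for (w2, c2) in items if w2 != best_w]
--     return " / ".join(top) or "cluster"
-- ===== Notes on version B (the rewrite author's own statement) =====
-- stated objective: alternative
-- what changed: Replaces the comprehension + Counter.most_common(3) heap selection by explicit counting loops over contents/tokens (computing the normalized word once per token) and top-3 extraction via three first-max linear scans with removal, instead of any sort or heap.
import Mathlib
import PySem

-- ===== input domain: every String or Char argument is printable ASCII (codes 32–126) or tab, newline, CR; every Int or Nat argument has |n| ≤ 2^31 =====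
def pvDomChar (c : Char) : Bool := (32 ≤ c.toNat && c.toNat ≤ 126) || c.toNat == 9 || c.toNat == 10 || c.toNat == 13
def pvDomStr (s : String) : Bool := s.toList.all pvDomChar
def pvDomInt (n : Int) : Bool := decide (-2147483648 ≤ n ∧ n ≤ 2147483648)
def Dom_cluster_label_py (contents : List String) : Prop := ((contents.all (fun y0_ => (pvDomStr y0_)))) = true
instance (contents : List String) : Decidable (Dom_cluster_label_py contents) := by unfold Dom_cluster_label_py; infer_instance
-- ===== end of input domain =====

-- B replaces A's comprehension + Counter.most_common(3) by explicit counting loops and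
-- repeated first-max selection scans (no sort/heap); objective: alternative decomposition.

-- ===== PORT A =====
-- module constant _STOPWORDS (a Python set literal)
def pvStopwords : PySem.Set String := PySem.Set.ofList
  ["the", "a", "an", "and", "or", "to", "in", "of", "is", "was", "i",
   "it", "for", "on", "at", "with", "this", "that", "from", "by", "are",
   "be", "as", "had", "have", "has", "not", "but", "they", "their",
   "my", "we", "you", "your", "its", "into", "which", "will", "can",
   "been", "were", "would", "could", "should", "he", "she", "also",
   "all", "more", "when", "there", "if", "than", "so", "out", "about",
   "up", "some", "then", "no", "do", "did", "just", "now", "new"]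

-- w.lower().strip(".,;:!?\"'()[]") (appears verbatim in both Pythons)
def pvNorm (w : String) : String := PySem.Str.stripChars (PySem.Str.lower w) ".,;:!?\"'()[]"

-- the list comprehension 'words'
def pvWordsA (contents : List String) : List String :=
  contents.flatMap (fun c =>
    (PySem.Str.split₀ c).filterMap (fun w =>
      if PySem.Str.len w > 3 ∧ ¬ (pvNorm w ∈ pvStopwords) then some (pvNorm w) else none))

-- Counter(words).most_common(3): CPython's most_common(3) (heapq.nlargest, stable) is ported as
-- the stable reverse sort of the counter's items by count, sliced to 3.
def cluster_label_py (contents : List String) : String :=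
  let top := (PySem.List.sorted (PySem.Dict.counter (pvWordsA contents)).items (fun p => p.2) true).take 3
  let s := PySem.Str.join " / " (top.map (fun p => p.1))
  if s = "" then "cluster" else s   -- '… or "cluster"'

-- ===== PORT B =====
-- counts[w] = counts.get(w, 0) + 1 inside the two explicit loops
def pvCountsB (contents : List String) : PySem.Dict String Int :=
  contents.foldl (fun d c =>
    (PySem.Str.split₀ c).foldl (fun d raw =>
      if PySem.Str.len raw > 3 then
        let w := pvNorm raw
        if ¬ (w ∈ pvStopwords) then d.insert w (d.getD w 0 + 1) else d
      else d) d) PySem.Dict.empty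

-- the inner scan: first pair with maximal count (strict '>' keeps the earliest)
def pvFirstMax (b : String × Int) : List (String × Int) → String × Int
  | [] => b
  | p :: t => pvFirstMax (if p.2 > b.2 then p else b) t

-- the while-loop: select, append, filter out the selected word
def pvPick : Nat → List (String × Int) → List String
  | 0, _ => []
  | _+1, [] => []
  | n+1, p :: t =>
      let b := pvFirstMax p t
      b.1 :: pvPick n ((p :: t).filter (fun q => q.1 ≠ b.1))

def cluster_label_py_alt (contents : List String) : String :=
  let top := pvPick 3 (pvCountsB contents).items
  let s := PySem.Str.join " / " top
  if s = "" then "cluster" else s   -- '… or "cluster"'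

-- ===== PRECONDITION & SPEC =====
def Spec_cluster_label_py (contents : List String) (out : String) : Prop :=
  out = cluster_label_py_alt contents
instance (contents : List String) (out : String) : Decidable (Spec_cluster_label_py contents out) := by
  unfold Spec_cluster_label_py; infer_instance

-- ===== CLAIM =====
def Claim_equal_cluster_label_py : Prop :=
  ∀ (contents : List String), Dom_cluster_label_py contents →
    Spec_cluster_label_py contents (cluster_label_py contents)

-- ===== LEMMAS AND PROOFS =====

theorem pvFirstMax_append (b x : String × Int) (t : List (String × Int)) :
    pvFirstMax b (t ++ [x]) = if x.2 > (pvFirstMax b t).2 then x else pvFirstMax b t := by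
  induction t generalizing b with
  | nil => rfl
  | cons p t ih => simp [pvFirstMax, ih]

theorem pvFirstMax_mem (b : String × Int) (t : List (String × Int)) :
    pvFirstMax b t ∈ b :: t := by
  induction t generalizing b with
  | nil => simp [pvFirstMax]
  | cons p t ih =>
    rw [pvFirstMax]
    rcases List.mem_cons.1 (ih (if p.2 > b.2 then p else b)) with h | h
    · rw [h]; split <;> simp
    · simp [h]

-- stable reverse sort extracts the first maximal element at the head
theorem pvSortedRev_append_singleton (l : List (String × Int)) (x : String × Int) :
    PySem.List.sorted (l ++ [x]) (fun q => q.2) true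
      = PySem.List.insertBy (fun a b : String × Int => decide (b.2 < a.2)) x
          (PySem.List.sorted l (fun q => q.2) true) := by
  rw [PySem.List.sorted_rev_eq_foldl_insertBy, PySem.List.sorted_rev_eq_foldl_insertBy,
    List.foldl_append]
  rfl

theorem pvInsertBy_cons (bf : (String × Int) → (String × Int) → Bool) (x m : String × Int)
    (S : List (String × Int)) :
    PySem.List.insertBy bf x (m :: S)
      = if bf x m then x :: m :: S else m :: PySem.List.insertBy bf x S := by
  rfl

theorem pvSorted_head (p : String × Int) (t : List (String × Int))
    (hnd : (((p :: t).map Prod.fst)).Nodup) :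
    PySem.List.sorted (p :: t) (fun q => q.2) true
      = pvFirstMax p t ::
        PySem.List.sorted ((p :: t).filter (fun q => q.1 ≠ (pvFirstMax p t).1)) (fun q => q.2) true := by
  induction t using List.reverseRecOn with
  | nil => simp [PySem.List.sorted_rev_eq_foldl_insertBy, PySem.List.insertBy, pvFirstMax]
  | append_singleton t x ih =>
    have hnd2 : (((p :: t) ++ [x]).map Prod.fst).Nodup := hnd
    rw [List.map_append] at hnd2
    have hx : x.1 ∉ (p :: t).map Prod.fst := by
      intro hmem
      exact (List.nodup_append.1 hnd2).2.2 x.1 hmem x.1 (List.mem_map_of_mem (List.mem_singleton_self x)) rfl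
    have hnd' : ((p :: t).map Prod.fst).Nodup := (List.nodup_append.1 hnd2).1
    have hcons : p :: (t ++ [x]) = (p :: t) ++ [x] := rfl
    have hmfm : pvFirstMax p t ∈ p :: t := pvFirstMax_mem p t
    rw [hcons, pvSortedRev_append_singleton, ih hnd', pvInsertBy_cons, pvFirstMax_append]
    by_cases hgt : x.2 > (pvFirstMax p t).2
    · have hfilter : ((p :: t) ++ [x]).filter (fun q => q.1 ≠ x.1) = p :: t := by
        rw [List.filter_append]
        have h1 : (p :: t).filter (fun q => q.1 ≠ x.1) = p :: t :=
          List.filter_eq_self.2 (fun q hq => by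
            simp only [ne_eq, decide_eq_true_eq]
            intro hq1; exact hx (hq1 ▸ List.mem_map_of_mem hq))
        rw [h1]; simp
      rw [if_pos (by simpa using hgt), if_pos hgt, hfilter, ih hnd']
    · have hne : x.1 ≠ (pvFirstMax p t).1 := by
        intro he
        exact hx (he ▸ List.mem_map_of_mem hmfm)
      have hfilter : ((p :: t) ++ [x]).filter (fun q => q.1 ≠ (pvFirstMax p t).1)
          = (p :: t).filter (fun q => q.1 ≠ (pvFirstMax p t).1) ++ [x] := by
        rw [List.filter_append]
        simp [hne]
      rw [if_neg (by simpa using hgt), if_neg hgt, hfilter, pvSortedRev_append_singleton]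

theorem pvPick_eq_sorted (n : Nat) (l : List (String × Int)) (hnd : (l.map Prod.fst).Nodup) :
    pvPick n l = ((PySem.List.sorted l (fun q => q.2) true).take n).map Prod.fst := by
  induction n generalizing l with
  | zero => simp [pvPick]
  | succ n ih =>
    cases l with
    | nil => simp [pvPick, PySem.List.sorted_rev_eq_foldl_insertBy]
    | cons p t =>
      have hndf : (((p :: t).filter (fun q => q.1 ≠ (pvFirstMax p t).1)).map Prod.fst).Nodup :=
        hnd.sublist (List.Sublist.map Prod.fst ((p :: t).filter_sublist))
      rw [pvPick, pvSorted_head p t hnd, List.take_succ_cons, List.map_cons, ih _ hndf]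

theorem pvCounts_eq (contents : List String) :
    pvCountsB contents = PySem.Dict.counter (pvWordsA contents) := by
  rw [PySem.Dict.counter_eq_foldl, pvWordsA, List.foldl_flatMap]
  unfold pvCountsB
  congr 1
  funext d c
  induction PySem.Str.split₀ c generalizing d with
  | nil => rfl
  | cons w t ih =>
    simp only [List.foldl_cons]
    by_cases h1 : PySem.Str.len w > 3
    · by_cases h2 : pvNorm w ∈ pvStopwords
      · rw [List.filterMap_cons_none (by rw [if_neg (fun hc => hc.2 h2)]),
          if_pos h1, if_neg (not_not_intro h2)]
        exact ih d
      · rw [List.filterMap_cons_some (by rw [if_pos ⟨h1, h2⟩]),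
          if_pos h1, if_pos h2, List.foldl_cons]
        rw [show (d.modify (pvNorm w) 0 (fun v => v + 1)) = d.insert (pvNorm w) (d.getD (pvNorm w) 0 + 1) from rfl]
        exact ih _
    · rw [List.filterMap_cons_none (by rw [if_neg (fun hc => h1 hc.1)]), if_neg h1]
      exact ih d

-- ===== VERDICT =====
theorem cluster_label_py_spec : Claim_equal_cluster_label_py := by
  intro contents _
  unfold Spec_cluster_label_py cluster_label_py cluster_label_py_alt
  rw [pvCounts_eq,
    pvPick_eq_sorted 3 (PySem.Dict.counter (pvWordsA contents)).items
      (by simpa [PySem.Dict.keys] using PySem.Dict.nodup_keys_counter (pvWordsA contents))]
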